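-- pv_equiv track=rewrite | github.com/ginomcevoy/lxai2019 | spta/util/maths.py | find_two_balanced_divisors
-- ===== SOURCE A (Python) =====
-- from math import sqrt
--
-- def divisors(n):
--     '''
--     Compute the divisors of a number, returns them in order.
--     '''
--     divs = {1, n}
--     for i in range(2, int(sqrt(n)) + 1):
--         if n % i == 0:
--             divs.update((i, n // i))
--     return sorted(divs)
--
-- def find_two_balanced_divisors(n):
--     '''
--     Given n, compute x, y integers such that x*y = n, with the property that they are the
--     the most "balanced", i.e. closest to each other.
--
--     Uses divisors and iterates them. For each divisor d, finds the quotient n/d. Stops when the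
--     quotient is not bigger than d.
--     '''
--     divs = divisors(n)
--
--     # handle prime case
--     if len(divs) == 2:
--         return divs
--
--     # iterate the divisors, find the moment where the quotient is not bigger
--     for div in divs:
--         quotient = n / div
--         if quotient <= div:
--             break
--
--     return [int(quotient), int(div)]
-- ===== SOURCE B (Python) =====
-- from math import isqrt
--
-- def find_two_balanced_divisors(n):
--     d = isqrt(n)
--     while n % d:
--         d -= 1
--     return [d, n // d]
-- ===== Notes on version B (the rewrite author's own statement) =====
-- stated objective: simpler
-- what changed: Instead of building the full sorted divisor list and scanning it for the first divisor whose quotient is not bigger, B walks d downward from isqrt(n) and returns [d, n//d] at the first d dividing n.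
-- outside the precondition, e.g. on find_two_balanced_divisors(0): A returns [0, 1], B raises ZeroDivisionError
import Mathlib
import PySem

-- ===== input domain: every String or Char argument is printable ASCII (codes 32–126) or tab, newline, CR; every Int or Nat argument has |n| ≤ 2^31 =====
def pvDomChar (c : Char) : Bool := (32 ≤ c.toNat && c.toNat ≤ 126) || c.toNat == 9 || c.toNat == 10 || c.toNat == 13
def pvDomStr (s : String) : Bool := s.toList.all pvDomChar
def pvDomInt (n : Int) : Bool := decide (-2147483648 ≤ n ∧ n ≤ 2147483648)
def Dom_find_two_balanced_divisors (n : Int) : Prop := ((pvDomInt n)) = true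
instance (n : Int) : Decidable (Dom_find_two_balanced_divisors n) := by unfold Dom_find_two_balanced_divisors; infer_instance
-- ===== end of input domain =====

-- B replaces A's build-all-divisors-then-sort-then-scan by a single downward walk from isqrt(n)
-- to the largest divisor ≤ isqrt(n); equivalence is proved on Pre_ (positive inputs).

-- ===== PORT A =====
-- divisors(n): divs = {1, n}; for i in range(2, int(sqrt(n)) + 1): if n % i == 0: divs.update((i, n // i)).
-- int(sqrt(n)) is ported as Nat.sqrt n.toNat: for 0 ≤ n ≤ 2^31 the correctly rounded float sqrt
-- never crosses an integer, so int(sqrt(n)) = isqrt(n) exactly there (n < 0 raises, outside Pre_).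
def pvDivSet (n : Int) : PySem.Set Int :=
  (PySem.List.pyRange 2 ((Nat.sqrt n.toNat : Int) + 1)).foldl
    (fun s i => if PySem.Int.mod n i = 0 then PySem.Set.update s [i, PySem.Int.floordiv n i] else s)
    (PySem.Set.ofList [1, n])

def pvDivisors (n : Int) : List Int := PySem.List.sorted (pvDivSet n) (fun x => x)

-- the 'for div in divs: quotient = n / div; if quotient <= div: break' loop; returns (quotient, div).
-- quotient = n / div is float true division, but every element of divs is a divisor of n with
-- |n| ≤ 2^31 < 2^53, so it is exactly the integer floordiv n div used here.
-- [] case: Python would leave quotient/div unbound (NameError); unreachable on Pre_.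
def pvScan (n : Int) : List Int → Int × Int
  | [] => (0, 0)
  | d :: rest =>
    let q := PySem.Int.floordiv n d
    if q ≤ d then (q, d) else pvScan n rest

def find_two_balanced_divisors (n : Int) : List Int :=
  let divs := pvDivisors n
  if divs.length = 2 then divs
  else
    let p := pvScan n divs
    [p.1, p.2]

-- ===== PORT B =====
-- the 'while n % d: d -= 1' walk, descending from d; d = 0 case: Python raises ZeroDivisionError,
-- unreachable on Pre_ (the smallest candidate always divides).
def pvDown (n : Int) : Nat → Int
  | 0 => 0
  | d + 1 => if PySem.Int.mod n ((d : Int) + 1) = 0 then (d : Int) + 1 else pvDown n d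

-- isqrt(n) ported as Nat.sqrt n.toNat (exact for n ≥ 0; n < 0 raises, outside Pre_).
def find_two_balanced_divisors_alt (n : Int) : List Int :=
  let d := pvDown n (Nat.sqrt n.toNat)
  [d, PySem.Int.floordiv n d]

-- ===== PRECONDITION & SPEC =====
-- Pre_ excludes n ≤ 0: for n < 0 both A and B raise (math domain error); at n = 0 A returns
-- [0, 1] only as an accident of the initial set {1, 0}, while B's downward divisor search
-- raises ZeroDivisionError there.
def Pre_find_two_balanced_divisors (n : Int) : Prop := 1 ≤ n
instance (n : Int) : Decidable (Pre_find_two_balanced_divisors n) := by unfold Pre_find_two_balanced_divisors; infer_instance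
def pvWitness_find_two_balanced_divisors : Int := 12

def Spec_find_two_balanced_divisors (n : Int) (out : List Int) : Prop := out = find_two_balanced_divisors_alt n
instance (n : Int) (out : List Int) : Decidable (Spec_find_two_balanced_divisors n out) := by unfold Spec_find_two_balanced_divisors; infer_instance

-- ===== CLAIM (what is proved, stated in full; the proofs are below) =====
def Claim_equal_find_two_balanced_divisors : Prop := ∀ (n : Int), Dom_find_two_balanced_divisors n → Pre_find_two_balanced_divisors n → Spec_find_two_balanced_divisors n (find_two_balanced_divisors n)

-- ===== LEMMAS AND PROOFS =====

-- bounds of Nat.sqrt, cast to Int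
theorem pv_sqrt_bounds {n : Int} (hn : 1 ≤ n) :
    (Nat.sqrt n.toNat : Int) * (Nat.sqrt n.toNat : Int) ≤ n ∧
    n < ((Nat.sqrt n.toNat : Int) + 1) * ((Nat.sqrt n.toNat : Int) + 1) := by
  
  have h1 : Nat.sqrt n.toNat ^ 2 ≤ n.toNat := Nat.sqrt_le' n.toNat
  have h2 : n.toNat < (Nat.sqrt n.toNat).succ ^ 2 := Nat.lt_succ_sqrt' n.toNat
  rw [pow_two] at h1; rw [Nat.succ_eq_add_one, pow_two] at h2
  have := Int.ofNat_le.mpr h1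
  have := Int.ofNat_lt.mpr h2
  push_cast at *
  omega

-- pvDown n m is the greatest divisor of n among 1..m
theorem pv_down_spec {n : Int} (m : Nat) (hm : 1 ≤ m) :
    1 ≤ pvDown n m ∧ pvDown n m ≤ (m : Int) ∧ pvDown n m ∣ n ∧
    ∀ e : Int, 1 ≤ e → e ≤ (m : Int) → e ∣ n → e ≤ pvDown n m := by
  
  induction m with
  | zero => omega
  | succ d ih =>
    by_cases hdvd : PySem.Int.mod n ((d : Int) + 1) = 0
    · have hstep : pvDown n (d + 1) = (d : Int) + 1 := by
        simp only [pvDown]; rw [if_pos hdvd]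
      have hdv : ((d : Int) + 1) ∣ n := (PySem.Int.mod_eq_zero_iff_dvd n _).mp hdvd
      rw [hstep]
      refine ⟨by omega, by push_cast; omega, hdv, ?_⟩
      intro e he1 he2 he3; push_cast at he2 ⊢; omega
    · have hstep : pvDown n (d + 1) = pvDown n d := by
        simp only [pvDown]; rw [if_neg hdvd]
      rcases Nat.eq_zero_or_pos d with hd0 | hdpos
      · exfalso; subst hd0
        exact hdvd ((PySem.Int.mod_eq_zero_iff_dvd n 1).mpr (one_dvd n))
      · obtain ⟨i1, i2, i3, i4⟩ := ih hdpos
        rw [hstep]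
        refine ⟨i1, by push_cast; omega, i3, ?_⟩
        intro e he1 he2 he3
        apply i4 e he1 _ he3
        have hne : e ≠ (d : Int) + 1 := by
          rintro rfl; exact hdvd ((PySem.Int.mod_eq_zero_iff_dvd n _).mpr he3)
        push_cast at he2 ⊢; omega

-- membership in the divisor set
theorem pv_mem_update2 (s : PySem.Set Int) (a b x : Int) :
    x ∈ PySem.Set.update s [a, b] ↔ x ∈ s ∨ x = a ∨ x = b := by
  simp [PySem.Set.update, List.foldl, PySem.Set.mem_add, or_assoc]

theorem pv_mem_fold (n : Int) (l : List Int) (init : PySem.Set Int) (x : Int) :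
    x ∈ l.foldl
      (fun s i => if PySem.Int.mod n i = 0 then PySem.Set.update s [i, PySem.Int.floordiv n i] else s)
      init ↔
    x ∈ init ∨ ∃ i ∈ l, PySem.Int.mod n i = 0 ∧ (x = i ∨ x = PySem.Int.floordiv n i) := by
  induction l generalizing init with
  | nil => simp
  | cons a t ih =>
    simp only [List.foldl_cons, List.mem_cons]
    rw [ih]
    by_cases h : PySem.Int.mod n a = 0
    · rw [if_pos h, pv_mem_update2]
      constructor
      · rintro ((hx | hx | hx) | ⟨i, hi, hmod, hx⟩)
        · exact Or.inl hx
        · exact Or.inr ⟨a, Or.inl rfl, h, Or.inl hx⟩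
        · exact Or.inr ⟨a, Or.inl rfl, h, Or.inr hx⟩
        · exact Or.inr ⟨i, Or.inr hi, hmod, hx⟩
      · rintro (hx | ⟨i, (rfl | hi), hmod, hx⟩)
        · exact Or.inl (Or.inl hx)
        · rcases hx with hx | hx
          · exact Or.inl (Or.inr (Or.inl hx))
          · exact Or.inl (Or.inr (Or.inr hx))
        · exact Or.inr ⟨i, hi, hmod, hx⟩
    · rw [if_neg h]
      constructor
      · rintro (hx | ⟨i, hi, hmod, hx⟩)
        · exact Or.inl hx
        · exact Or.inr ⟨i, Or.inr hi, hmod, hx⟩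
      · rintro (hx | ⟨i, (rfl | hi), hmod, hx⟩)
        · exact Or.inl hx
        · exact absurd hmod h
        · exact Or.inr ⟨i, hi, hmod, hx⟩

theorem pv_nodup_fold (n : Int) (l : List Int) (init : PySem.Set Int) (h : init.Nodup) :
    (l.foldl
      (fun s i => if PySem.Int.mod n i = 0 then PySem.Set.update s [i, PySem.Int.floordiv n i] else s)
      init).Nodup := by
  induction l generalizing init with
  | nil => exact h
  | cons a t ih =>
    simp only [List.foldl_cons]
    apply ih
    by_cases hc : PySem.Int.mod n a = 0
    · rw [if_pos hc]
      simp only [PySem.Set.update, List.foldl]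
      exact PySem.Set.nodup_add _ _ (PySem.Set.nodup_add _ _ h)
    · rw [if_neg hc]; exact h

theorem pv_mem_divSet {n : Int} (hn : 1 ≤ n) (x : Int) :
    x ∈ pvDivSet n ↔ x ∣ n ∧ 1 ≤ x := by
  
  have hsq1 : ((Nat.sqrt n.toNat : Int)) * (Nat.sqrt n.toNat : Int) ≤ n := by
    have h1 : Nat.sqrt n.toNat ^ 2 ≤ n.toNat := Nat.sqrt_le' n.toNat
    rw [pow_two] at h1; have := Int.ofNat_le.mpr h1; push_cast at this ⊢; omega
  have hsq2 : n < ((Nat.sqrt n.toNat : Int) + 1) * ((Nat.sqrt n.toNat : Int) + 1) := by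
    have h2 : n.toNat < (Nat.sqrt n.toNat).succ ^ 2 := Nat.lt_succ_sqrt' n.toNat
    rw [Nat.succ_eq_add_one, pow_two] at h2; have := Int.ofNat_lt.mpr h2
    push_cast at this ⊢; omega
  set s : Int := (Nat.sqrt n.toNat : Int) with hs
  have hs0 : 0 ≤ s := by positivity
  unfold pvDivSet
  rw [pv_mem_fold]
  simp only [PySem.Set.mem_ofList, List.mem_cons,
    PySem.List.mem_pyRange_one]
  constructor
  · rintro ((rfl | (rfl | h)) | ⟨i, ⟨hi2, hilt⟩, hmod, hx⟩)
    · exact ⟨one_dvd n, le_refl 1⟩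
    · exact ⟨dvd_rfl, hn⟩
    · cases h
    · have hidvd : i ∣ n := (PySem.Int.mod_eq_zero_iff_dvd n i).mp hmod
      have hipos : 0 < i := by omega
      obtain ⟨c, hc⟩ := hidvd
      rcases hx with rfl | rfl
      · exact ⟨⟨c, hc⟩, by omega⟩
      · rw [PySem.Int.floordiv_eq_ediv_of_pos hipos, hc,
          Int.mul_ediv_cancel_left _ (by omega)]
        exact ⟨⟨i, mul_comm i c⟩, by nlinarith⟩
  · rintro ⟨hdvd, hx1⟩
    have hxn : x ≤ n := Int.le_of_dvd (by omega) hdvd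
    by_cases hx1' : x = 1
    · exact Or.inl (Or.inl hx1')
    by_cases hxn' : x = n
    · exact Or.inl (Or.inr (Or.inl hxn'))
    have hx2 : 2 ≤ x := by omega
    have hxltn : x < n := by omega
    by_cases hxs : x ≤ s
    · refine Or.inr ⟨x, ⟨hx2, by omega⟩, (PySem.Int.mod_eq_zero_iff_dvd n x).mpr hdvd, Or.inl rfl⟩
    · -- cofactor c = n / x
      obtain ⟨c, hc⟩ := hdvd
      have hxpos : (0:Int) < x := by omega
      have hcpos : 0 < c := by nlinarith
      have hcdvd : c ∣ n := ⟨x, by rw [hc]; ring⟩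
      have hc2 : 2 ≤ c := by
        rcases (by omega : c = 1 ∨ 2 ≤ c) with rfl | h
        · simp at hc; omega
        · exact h
      have hcs : c ≤ s := by nlinarith
      refine Or.inr ⟨c, ⟨hc2, by omega⟩, (PySem.Int.mod_eq_zero_iff_dvd n c).mpr hcdvd, Or.inr ?_⟩
      rw [PySem.Int.floordiv_eq_ediv_of_pos hcpos, hc, Int.mul_ediv_cancel _ (by omega)]

theorem pv_nodup_divSet (n : Int) : (pvDivSet n).Nodup := by
  
  unfold pvDivSet
  exact pv_nodup_fold n _ _ (PySem.Set.nodup_ofList _)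

theorem pv_scan_eq {n k : Int} (hn : 1 ≤ n) (hk1 : 1 ≤ k) (hkd : k ∣ n)
    (hksq : k * k ≤ n)
    (hmax : ∀ e : Int, 1 ≤ e → e ∣ n → e * e ≤ n → e ≤ k) :
    ∀ L : List Int, L.Pairwise (· < ·) → (∀ x ∈ L, x ∣ n ∧ 1 ≤ x) → n / k ∈ L →
      pvScan n L = (k, n / k) := by
  
  obtain ⟨c, hc⟩ := hkd
  have hc1 : 1 ≤ c := by nlinarith
  have hnk : n / k = c := by rw [hc, Int.mul_ediv_cancel_left _ (by omega)]
  intro L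
  induction L with
  | nil => intro _ _ h; cases h
  | cons d rest ih =>
    intro hpw hdiv hmem
    have hddvd : d ∣ n := (hdiv d (List.mem_cons_self)).1
    have hd1 : 1 ≤ d := (hdiv d (List.mem_cons_self)).2
    obtain ⟨e, he⟩ := hddvd
    have he1 : 1 ≤ e := by nlinarith
    have hnd : n / d = e := by rw [he, Int.mul_ediv_cancel_left _ (by omega)]
    rcases List.mem_cons.mp hmem with hdc | hrest
    · -- head is n/k = c: condition holds
      have hdceq : d = c := by omega
      have h1 : n = c * e := by rw [← hdceq]; exact he
      have hek : k = e :=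
        mul_left_cancel₀ (show (c:Int) ≠ 0 by omega)
          (by rw [mul_comm c k, ← hc]; exact h1)
      have hcond : PySem.Int.floordiv n d ≤ d := by
        rw [PySem.Int.floordiv_eq_ediv_of_pos (by omega), hnd]
        -- e = k ≤ c = d since k*k ≤ n = k*c
        nlinarith
      simp only [pvScan]
      rw [if_pos hcond]
      simp only [Prod.mk.injEq]
      refine ⟨?_, by omega⟩
      rw [PySem.Int.floordiv_eq_ediv_of_pos (by omega), hnd]
      omega
    · -- head comes before n/k: d < c, condition fails
      have hdc : d < c := by
        have := (List.pairwise_cons.mp hpw).1 _ hrest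
        omega
      have hcond : ¬ PySem.Int.floordiv n d ≤ d := by
        rw [PySem.Int.floordiv_eq_ediv_of_pos (by omega), hnd]
        intro hle
        -- e ≤ d, e divides n; if e*e ≤ n then e ≤ k so c = n/k ≤ n/e ≤ d, contra
        have heddvd : e ∣ n := ⟨d, by rw [he]; ring⟩
        have hesq : e * e ≤ n := by nlinarith
        have hek : e ≤ k := hmax e he1 heddvd hesq
        -- n = d*e = k*c, e ≤ k, want d ≥ c contradiction with d < c
        nlinarith
      simp only [pvScan]
      rw [if_neg hcond]
      exact ih (List.pairwise_cons.mp hpw).2 (fun x hx => hdiv x (List.mem_cons_of_mem _ hx)) hrest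

-- ===== VERDICT (by name: the statement is the Claim_ definition above) =====
theorem find_two_balanced_divisors_spec : Claim_equal_find_two_balanced_divisors := by
  intro n hdom hpre
  unfold Pre_find_two_balanced_divisors at hpre
  unfold Spec_find_two_balanced_divisors
  obtain ⟨hsq1, hsq2⟩ := pv_sqrt_bounds hpre
  set s : Nat := Nat.sqrt n.toNat with hs
  have hs1 : 1 ≤ s := by
    by_contra h
    have : s = 0 := by omega
    rw [this] at hsq2; push_cast at hsq2; omega
  obtain ⟨hk1, hks, hkd, hkmax⟩ := pv_down_spec s hs1
  set k : Int := pvDown n s with hk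
  have hkmax' : ∀ e : Int, 1 ≤ e → e ∣ n → e * e ≤ n → e ≤ k := by
    intro e he1 hed hesq
    apply hkmax e he1 _ hed
    nlinarith
  obtain ⟨c, hc⟩ := hkd
  have hc1 : 1 ≤ c := by nlinarith
  have hnk : n / k = c := by rw [hc, Int.mul_ediv_cancel_left _ (by omega)]
  have hcd : c ∣ n := ⟨k, by rw [hc]; ring⟩
  -- B's value
  have hB : find_two_balanced_divisors_alt n = [k, c] := by
    unfold find_two_balanced_divisors_alt
    rw [← hs, ← hk]
    show [k, PySem.Int.floordiv n k] = [k, c]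
    rw [PySem.Int.floordiv_eq_ediv_of_pos (by omega), hnk]
  -- properties of the sorted divisor list
  have hmemD : ∀ x, x ∈ pvDivisors n ↔ x ∣ n ∧ 1 ≤ x := by
    intro x
    unfold pvDivisors
    rw [PySem.List.mem_sorted, pv_mem_divSet hpre]
  have hperm : (pvDivisors n).Perm (pvDivSet n) := PySem.List.sorted_perm _ _ _
  have hnodup : (pvDivisors n).Nodup := hperm.symm.nodup (pv_nodup_divSet n)
  have hple : (pvDivisors n).Pairwise (· ≤ ·) := PySem.List.sorted_pairwise _ _
  have hplt : (pvDivisors n).Pairwise (· < ·) :=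
    (hple.and hnodup).imp (fun h => lt_of_le_of_ne h.1 h.2)
  have hcmem : c ∈ pvDivisors n := (hmemD c).mpr ⟨hcd, hc1⟩
  have hscan : pvScan n (pvDivisors n) = (k, n / k) :=
    pv_scan_eq hpre hk1 ⟨c, hc⟩ (by nlinarith) hkmax' (pvDivisors n) hplt
      (fun x hx => (hmemD x).mp hx) (by rw [hnk]; exact hcmem)
  unfold find_two_balanced_divisors
  by_cases hlen : (pvDivisors n).length = 2
  · rw [if_pos hlen, hB]
    -- the two-element case: the list is [1, n], and k = 1, c = n
    obtain ⟨a, b, hab⟩ := List.length_eq_two.mp hlen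
    have h1mem : (1:Int) ∈ pvDivisors n := (hmemD 1).mpr ⟨one_dvd n, le_refl 1⟩
    have hnmem : n ∈ pvDivisors n := (hmemD n).mpr ⟨dvd_rfl, hpre⟩
    have haltb : a < b := by
      rw [hab] at hplt
      exact (List.pairwise_cons.mp hplt).1 b (List.mem_singleton.mpr rfl)
    have ha1 : 1 ≤ a := ((hmemD a).mp (by rw [hab]; exact List.mem_cons_self)).2
    have hn2 : 2 ≤ n := by
      by_contra h
      have hn1 : n = 1 := by omega
      have hb1 : b = 1 := by
        have := (hmemD b).mp (by rw [hab]; exact List.mem_cons_of_mem _ List.mem_cons_self)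
        have := Int.le_of_dvd (by omega) this.1
        omega
      have := (hmemD a).mp (by rw [hab]; exact List.mem_cons_self)
      have := Int.le_of_dvd (by omega) this.1
      omega
    rw [hab] at h1mem hnmem
    simp only [List.mem_cons, List.not_mem_nil, or_false] at h1mem hnmem
    have hae : a = 1 := by omega
    have hbe : b = n := by omega
    -- k ≤ s < n, so k ∈ {1, n} forces k = 1, hence c = n
    have hsn : (s : Int) < n := by nlinarith
    have hkmem : k ∈ pvDivisors n := (hmemD k).mpr ⟨⟨c, hc⟩, hk1⟩
    rw [hab] at hkmem
    simp only [List.mem_cons, List.not_mem_nil, or_false] at hkmem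
    have hke : k = 1 := by omega
    have hce : c = n := by rw [hke] at hc; omega
    rw [hab, hae, hbe, hke, hce]
  · rw [if_neg hlen, hB, hscan, hnk]
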